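-- pv_equiv track=rewrite | github.com/Xuniverzadmin/agenticverz_2.0 | scripts/ops/hoc_placement_analyzer.py | pick_canonical
-- ===== SOURCE A (Python) =====
-- def pick_canonical(group: list[dict[str, str]]) -> str:
--     """Pick canonical function from a duplicate group.
--
--     Prefer: most callers, clearest intent, least side effects.
--     """
--     scored = []
--     for row in group:
--         score = 0
--         if row.get("intent") != "Unclassified":
--             score += 3
--         if row.get("called_by"):
--             # More callers = more authoritative
--             score += len(row.get("called_by", "").split(" | "))
--         if row.get("side_effects") == "pure":
--             score += 1
--         scored.append((score, row))
--
--     scored.sort(key=lambda x: -x[0])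
--     winner = scored[0][1]
--     return f"{winner.get('domain')}/{winner.get('file')}.{winner.get('symbol')}"
-- ===== SOURCE B (Python) =====
-- def pick_canonical(group: list[dict[str, str]]) -> str:
--     """Pick canonical function from a duplicate group.
--
--     Single-pass selection: keep the best-scored row so far (strict > keeps
--     the first row on ties, matching A's stable descending sort), score as
--     one arithmetic sum instead of sequential increments.
--     """
--     best = group[0]
--     best_score = _score(best)
--     for row in group[1:]:
--         s = _score(row)
--         if s > best_score:
--             best, best_score = row, s
--     return f"{best.get('domain')}/{best.get('file')}.{best.get('symbol')}"
--
--
-- def _score(row: dict[str, str]) -> int: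
--     return ((3 if row.get("intent") != "Unclassified" else 0)
--             + (len(row.get("called_by", "").split(" | ")) if row.get("called_by") else 0)
--             + (1 if row.get("side_effects") == "pure" else 0))
-- ===== Notes on version B (the rewrite author's own statement) =====
-- stated objective: simpler
-- what changed: Replaces build-pairs/sort-by-negated-score/index-0 with a single pass keeping the best row and score seen so far (strict > preserves first-occurrence ties of the stable sort); the score is one arithmetic sum instead of sequential increments.
import Mathlib
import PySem

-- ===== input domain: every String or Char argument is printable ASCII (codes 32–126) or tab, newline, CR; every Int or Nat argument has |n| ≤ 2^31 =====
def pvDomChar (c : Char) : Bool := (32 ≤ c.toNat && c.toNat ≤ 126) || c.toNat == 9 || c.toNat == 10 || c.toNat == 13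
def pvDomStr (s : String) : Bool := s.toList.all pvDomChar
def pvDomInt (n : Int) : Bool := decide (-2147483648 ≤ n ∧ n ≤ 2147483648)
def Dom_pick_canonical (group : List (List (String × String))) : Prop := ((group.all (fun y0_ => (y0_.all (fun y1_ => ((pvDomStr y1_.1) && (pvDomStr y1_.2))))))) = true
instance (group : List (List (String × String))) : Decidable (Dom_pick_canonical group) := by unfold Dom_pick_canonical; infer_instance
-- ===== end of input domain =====

-- ===== PORT A =====
-- B replaces A's build-pairs/sort-by-negated-score/index-0 with a single-pass selection loop; equal return values proved on nonempty groups.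
-- A row is a dict (assoc list, first-match lookup). Python truthiness of row.get("called_by"):
-- true iff the key maps to a nonempty string = (get? ..).getD "" ≠ "".
def pvRowScore (row : List (String × String)) : Int :=
  let d := PySem.Dict.mk row
  let score : Int := 0
  let score := if d.get? "intent" ≠ some "Unclassified" then score + 3 else score
  let score := if (d.get? "called_by").getD "" ≠ "" then
      -- cb.split(" | "): sep " | " is nonempty, so split? always returns some
      score + (((PySem.Str.split? ((d.get? "called_by").getD "") " | ").getD []).length : Int)
    else score
  let score := if d.get? "side_effects" = some "pure" then score + 1 else score
  score

-- f"{winner.get('domain')}/{winner.get('file')}.{winner.get('symbol')}"; Python renders a missing key (None) as "None".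
def pvFmt (winner : List (String × String)) : String :=
  let d := PySem.Dict.mk winner
  (d.get? "domain").getD "None" ++ "/" ++ (d.get? "file").getD "None" ++ "." ++ (d.get? "symbol").getD "None"

def pick_canonical (group : List (List (String × String))) : String :=
  let scored := group.foldl (fun acc row => acc ++ [(pvRowScore row, row)])
      ([] : List (Int × List (String × String)))
  let sortedL := PySem.List.sorted scored (fun x => -x.1) false
  -- scored[0][1]: IndexError on an empty group, excluded by Pre_
  pvFmt (PySem.List.pyGetD sortedL 0 ((0 : Int), ([] : List (String × String)))).2

-- ===== PORT B =====
-- _score(row): one arithmetic sum of the three components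
def scoreB (row : List (String × String)) : Int :=
  let d := PySem.Dict.mk row
  (if d.get? "intent" ≠ some "Unclassified" then (3 : Int) else 0)
  + (if (d.get? "called_by").getD "" ≠ "" then
       (((PySem.Str.split? ((d.get? "called_by").getD "") " | ").getD []).length : Int)
     else 0)
  + (if d.get? "side_effects" = some "pure" then (1 : Int) else 0)

-- the 'for row in group[1:]' selection loop, carrying (best, best_score)
def selectB (best : List (String × String)) (bestScore : Int) :
    List (List (String × String)) → List (String × String)
  | [] => best
  | row :: rest =>
    let s := scoreB row
    if bestScore < s then selectB row s rest else selectB best bestScore rest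

def pick_canonical_alt (group : List (List (String × String))) : String :=
  match group with
  | [] => ""   -- group[0] raises IndexError on an empty group, excluded by Pre_
  | g :: gs =>
    let w := selectB g (scoreB g) gs
    let d := PySem.Dict.mk w
    (d.get? "domain").getD "None" ++ "/" ++ (d.get? "file").getD "None" ++ "." ++ (d.get? "symbol").getD "None"

-- ===== PRECONDITION & SPEC =====
-- On the empty group A raises IndexError (scored[0]) and B raises IndexError (group[0]): excluded.
def Pre_pick_canonical (group : List (List (String × String))) : Prop := group ≠ []
instance (group : List (List (String × String))) : Decidable (Pre_pick_canonical group) := by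
  unfold Pre_pick_canonical; infer_instance
def pvWitness_pick_canonical : (List (List (String × String))) :=
  [[("domain", "api"), ("file", "main"), ("symbol", "run")]]
def Spec_pick_canonical (group : List (List (String × String))) (out : String) : Prop := out = pick_canonical_alt group
instance (group : List (List (String × String))) (out : String) : Decidable (Spec_pick_canonical group out) := by unfold Spec_pick_canonical; infer_instance

-- ===== CLAIM (what is proved, stated in full; the proofs are below) =====
def Claim_equal_pick_canonical : Prop := ∀ (group : List (List (String × String))), Dom_pick_canonical group → Pre_pick_canonical group → Spec_pick_canonical group (pick_canonical group)

-- ===== LEMMAS AND PROOFS =====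

-- the two score computations agree
theorem scoreB_eq (row : List (String × String)) : scoreB row = pvRowScore row := by
  simp only [scoreB, pvRowScore]
  split_ifs <;> omega

-- head of A's stable ascending-by-(-score) insertion sort tracked against an optional running first-maximum
theorem pv_loop_head {alpha : Type} (key : alpha → Int) :
    ∀ (xs : List alpha) (L : List (Int × alpha)) (o : Option alpha),
      L.head? = o.map (fun m => (key m, m)) →
      (xs.foldl (fun acc x =>
          PySem.List.insertBy (fun a b => decide (-a.1 < -b.1)) (key x, x) acc) L).head?
        = (xs.foldl (fun acc x =>
            match acc with
            | none => some x
            | some m => if key m < key x then some x else some m) o).map (fun m => (key m, m)) := by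
  intro xs
  induction xs with
  | nil => intro L o h; simpa using h
  | cons x t ih =>
    intro L o h
    simp only [List.foldl_cons]
    cases L with
    | nil =>
      cases o with
      | none => exact ih _ _ (by simp [PySem.List.insertBy])
      | some m => simp at h
    | cons y ys =>
      cases o with
      | none => simp at h
      | some m =>
        simp only [Option.map_some] at h
        injection h with hy
        subst hy
        simp only [PySem.List.insertBy]
        by_cases hlt : key m < key x
        · rw [if_pos (by simp [hlt] : decide (-key x < -key m) = true), if_pos hlt]
          exact ih _ (some x) (by simp)
        · rw [if_neg (by simp [hlt] : ¬ decide (-key x < -key m) = true), if_neg hlt]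
          exact ih _ (some m) (by simp)

-- a fold started at 'some' stays 'some' of the plain running-maximum fold
theorem pv_foldl_some {alpha : Type} (key : alpha → Int) :
    ∀ (xs : List alpha) (m : alpha),
      xs.foldl (fun acc x =>
          match acc with
          | none => some x
          | some m => if key m < key x then some x else some m) (some m)
        = some (xs.foldl (fun b x => if key b < key x then x else b) m) := by
  intro xs
  induction xs with
  | nil => intro m; rfl
  | cons x t ih =>
    intro m
    simp only [List.foldl_cons]
    by_cases h : key m < key x
    · simp only [if_pos h]; exact ih x
    · simp only [if_neg h]; exact ih m

-- B's recursive selection loop is that running-maximum fold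
theorem selectB_eq_foldl :
    ∀ (xs : List (List (String × String))) (b : List (String × String)),
      selectB b (scoreB b) xs = xs.foldl (fun b x => if scoreB b < scoreB x then x else b) b := by
  intro xs
  induction xs with
  | nil => intro b; rfl
  | cons x t ih =>
    intro b
    simp only [selectB, List.foldl_cons]
    by_cases h : scoreB b < scoreB x
    · simp only [if_pos h]; exact ih x
    · simp only [if_neg h]; exact ih b

-- ===== VERDICT (by name: the statement is the Claim_ definition above) =====
theorem pick_canonical_spec : Claim_equal_pick_canonical := by
  intro group _hdom hpre
  unfold Spec_pick_canonical
  cases group with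
  | nil => exact absurd rfl hpre
  | cons g gs =>
    unfold pick_canonical pick_canonical_alt
    simp only [PySem.List.foldl_append_singleton_eq_map, List.nil_append]
    rw [PySem.List.sorted_eq_foldl_insertBy, List.foldl_map]
    simp only [List.foldl_cons]
    have h := pv_loop_head pvRowScore (g :: gs) [] none rfl
    simp only [List.foldl_cons] at h
    rw [pv_foldl_some pvRowScore gs g, Option.map_some] at h
    cases hL : List.foldl (fun acc x =>
        PySem.List.insertBy (fun a b => decide (-a.1 < -b.1)) (pvRowScore x, x) acc)
        (PySem.List.insertBy (fun a b => decide (-a.1 < -b.1)) (pvRowScore g, g) []) gs with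
    | nil => rw [hL] at h; simp at h
    | cons y ys =>
      rw [hL] at h
      simp only [List.head?_cons, Option.some.injEq] at h
      rw [PySem.List.pyGetD_zero_cons, h]
      rw [selectB_eq_foldl]
      simp only [scoreB_eq]
      rfl
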